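-- pv_equiv track=rewrite | github.com/WCRP-CMIP/Essential-Model-Documentation | Model-CRS/cnrm_esm2_to_crs.py | generate_crs
-- ===== SOURCE A (Python) =====
-- def generate_crs(embeddings, couplings):
--     """Generate canonical CRS from embeddings and couplings"""
--     couplings = {tuple(sorted(pair)) for pair in couplings}
--     parent_map = {c: p for c, p in embeddings}
--     realms = sorted(set([c for c,p in embeddings] + [p for c,p in embeddings] + [x for pair in couplings for x in pair]))
--
--     def chain(r):
--         for c, p in embeddings:
--             if p == r:
--                 return f"{r}[{chain(c)}]"
--         return r
--
--     roots = [r for r in realms if r not in parent_map]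
--     realm_couple = {r: set() for r in realms}
--     for r1, r2 in couplings:
--         if realms.index(r1) < realms.index(r2):
--             realm_couple[r1].add(r2)
--         else:
--             realm_couple[r2].add(r1)
--
--     parts = []
--     for r in roots:
--         s = chain(r)
--         couples = sorted(realm_couple[r])
--         if couples:
--             s += f"({','.join(couples)})"
--         parts.append(s)
--
--     return ''.join(parts)
-- ===== SOURCE B (Python) =====
-- def generate_crs(embeddings, couplings):
--     """Generate canonical CRS from embeddings and couplings"""
--     children = {c for c, _ in embeddings}
--     realms = sorted({x for pair in embeddings for x in pair}
--                     | {x for pair in couplings for x in pair})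
--     partners = {r: set() for r in realms}
--     for a, b in couplings:
--         lo, hi = (a, b) if a <= b else (b, a)
--         partners[lo].add(hi)
--     parts = []
--     for r in realms:
--         if r in children:
--             continue
--         path = [r]
--         while True:
--             nxt = next((c for c, p in embeddings if p == path[-1]), None)
--             if nxt is None:
--                 break
--             path.append(nxt)
--         s = path[-1]
--         for name in reversed(path[:-1]):
--             s = name + "[" + s + "]"
--         couples = sorted(partners[r])
--         if couples:
--             s += "(" + ",".join(couples) + ")"
--         parts.append(s)
--     return "".join(parts)
-- ===== Notes on version B (the rewrite author's own statement) =====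
-- stated objective: alternative
-- what changed: B replaces A's recursive chain() with an iterative walk whose collected path is folded back-to-front into the nested string, drops the parent_map dict (roots found via a child set) and the normalized coupling set, and orients each coupling by direct string comparison instead of two realms.index scans.
import Mathlib
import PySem

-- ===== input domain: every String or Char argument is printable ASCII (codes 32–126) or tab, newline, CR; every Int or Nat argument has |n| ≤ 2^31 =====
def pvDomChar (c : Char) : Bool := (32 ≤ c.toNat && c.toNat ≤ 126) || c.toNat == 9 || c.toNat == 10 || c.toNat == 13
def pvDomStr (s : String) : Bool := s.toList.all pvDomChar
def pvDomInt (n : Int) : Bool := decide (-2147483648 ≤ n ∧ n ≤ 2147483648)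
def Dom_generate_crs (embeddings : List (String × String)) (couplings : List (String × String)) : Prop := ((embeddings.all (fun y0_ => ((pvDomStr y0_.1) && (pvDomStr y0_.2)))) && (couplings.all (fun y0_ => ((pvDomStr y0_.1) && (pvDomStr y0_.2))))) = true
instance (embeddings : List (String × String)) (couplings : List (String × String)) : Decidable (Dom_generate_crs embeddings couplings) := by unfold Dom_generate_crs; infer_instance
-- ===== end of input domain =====

-- B replaces A's recursive chain by an iterative walk folded back-to-front, drops the parent_map dict and the
-- normalized coupling set, and orients each coupling by direct string comparison instead of two realms.index scans
-- (alternative decomposition, same result).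

-- ===== PORT A =====
-- tuple(sorted(pair)) for a 2-tuple
def sortPairA (p : String × String) : String × String :=
  if p.1 ≤ p.2 then (p.1, p.2) else (p.2, p.1)

-- def chain(r): the fuel argument only makes the Python recursion total; under Pre_ it is never exhausted
def chainA (embeddings : List (String × String)) : Nat → String → String
  | 0, r => r
  | k+1, r =>
    match embeddings.find? (fun cp => cp.2 == r) with
    | some cp => r ++ "[" ++ chainA embeddings k cp.1 ++ "]"
    | none => r

def generate_crs (embeddings : List (String × String)) (couplings : List (String × String)) : String :=
  let cset : PySem.Set (String × String) := PySem.Set.ofList (couplings.map sortPairA)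
  let parent_map : PySem.Dict String String :=
    embeddings.foldl (fun d cp => d.insert cp.1 cp.2) PySem.Dict.empty
  let realms : List String :=
    PySem.List.sorted (PySem.Set.ofList
      (embeddings.map (·.1) ++ embeddings.map (·.2) ++ cset.flatMap (fun p => [p.1, p.2])))
      (fun x => x) false
  let roots := realms.filter (fun r => !(parent_map.contains r))
  let rc0 : PySem.Dict String (PySem.Set String) :=
    realms.foldl (fun d r => d.insert r PySem.Set.empty) PySem.Dict.empty
  -- realms.index never raises here (both components of every pair in cset are in realms); .getD 0 only totalizes
  let realm_couple := cset.foldl (fun d p =>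
      if (PySem.List.index? realms p.1).getD 0 < (PySem.List.index? realms p.2).getD 0 then
        d.modify p.1 PySem.Set.empty (fun s => PySem.Set.add s p.2)
      else
        d.modify p.2 PySem.Set.empty (fun s => PySem.Set.add s p.1)) rc0
  let parts := roots.foldl (fun acc r =>
      let s := chainA embeddings (embeddings.length + 1) r
      let couples := PySem.List.sorted (realm_couple.getD r PySem.Set.empty) (fun x => x) false
      let s := if couples.isEmpty then s else s ++ "(" ++ PySem.Str.join "," couples ++ ")"
      acc ++ [s]) []
  PySem.Str.join "" parts

-- ===== PORT B =====
-- the while loop collecting the path root→leaf; fuel only makes the loop total (never exhausted under Pre_)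
def pathB (embeddings : List (String × String)) : Nat → String → List String
  | 0, r => [r]
  | k+1, r =>
    match embeddings.find? (fun cp => cp.2 == r) with
    | none => [r]
    | some cp => r :: pathB embeddings k cp.1

-- s = path[-1]; for name in reversed(path[:-1]): s = name + "[" + s + "]"
def wrapB : List String → String
  | [] => ""
  | [x] => x
  | x :: y :: t => x ++ "[" ++ wrapB (y :: t) ++ "]"

def generate_crs_alt (embeddings : List (String × String)) (couplings : List (String × String)) : String :=
  let children : PySem.Set String := PySem.Set.ofList (embeddings.map (·.1))
  let realms : List String :=
    PySem.List.sorted (PySem.Set.union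
      (PySem.Set.ofList (embeddings.flatMap (fun p => [p.1, p.2])))
      (couplings.flatMap (fun p => [p.1, p.2]))) (fun x => x) false
  let partners0 : PySem.Dict String (PySem.Set String) :=
    realms.foldl (fun d r => d.insert r PySem.Set.empty) PySem.Dict.empty
  let partners := couplings.foldl (fun d p =>
      let lh := if p.1 ≤ p.2 then (p.1, p.2) else (p.2, p.1)
      d.modify lh.1 PySem.Set.empty (fun s => PySem.Set.add s lh.2)) partners0
  let parts := realms.foldl (fun acc r =>
      if children.contains r then acc
      else
        let s := wrapB (pathB embeddings (embeddings.length + 1) r)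
        let couples := PySem.List.sorted (partners.getD r PySem.Set.empty) (fun x => x) false
        let s := if couples.isEmpty then s else s ++ "(" ++ PySem.Str.join "," couples ++ ")"
        acc ++ [s]) []
  PySem.Str.join "" parts

-- ===== PRECONDITION & SPEC =====
-- pure reachability check on the input graph (computes no output): the parent→first-child step
def firstChildPre (embeddings : List (String × String)) (r : String) : Option String :=
  (embeddings.find? (fun cp => cp.2 == r)).map (·.1)

def descends (embeddings : List (String × String)) : Nat → String → Bool
  | 0, _ => false
  | k+1, r =>
    match firstChildPre embeddings r with
    | none => true
    | some c => descends embeddings k c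

-- Pre_ excludes exactly the inputs on which Python A raises (RecursionError): the first-child descent from some
-- root realm cycles, so A's chain recursion never terminates (B's while loop does not terminate there either).
def Pre_generate_crs (embeddings : List (String × String)) (couplings : List (String × String)) : Prop :=
  ∀ r ∈ embeddings.map (·.2) ++ couplings.flatMap (fun p => [p.1, p.2]),
    r ∈ embeddings.map (·.1) ∨ descends embeddings (embeddings.length + 1) r = true

instance (embeddings : List (String × String)) (couplings : List (String × String)) : Decidable (Pre_generate_crs embeddings couplings) := by unfold Pre_generate_crs; infer_instance

def pvWitness_generate_crs : (List (String × String)) × (List (String × String)) :=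
  ([("ocean", "top")], [("ocean", "seaIce")])

def Spec_generate_crs (embeddings : List (String × String)) (couplings : List (String × String)) (out : String) : Prop := out = generate_crs_alt embeddings couplings
instance (embeddings : List (String × String)) (couplings : List (String × String)) (out : String) : Decidable (Spec_generate_crs embeddings couplings out) := by unfold Spec_generate_crs; infer_instance

-- ===== CLAIM (what is proved, stated in full; the proofs are below) =====
def Claim_equal_generate_crs : Prop := ∀ (embeddings : List (String × String)) (couplings : List (String × String)), Dom_generate_crs embeddings couplings → Pre_generate_crs embeddings couplings → Spec_generate_crs embeddings couplings (generate_crs embeddings couplings)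

-- ===== LEMMAS AND PROOFS =====

theorem pathB_ne_nil (emb : List (String × String)) (k : Nat) (r : String) :
    pathB emb k r ≠ [] := by
  cases k with
  | zero => simp [pathB]
  | succ k =>
    simp only [pathB]
    cases emb.find? (fun cp => cp.2 == r) <;> simp

theorem wrapB_cons (r : String) (l : List String) (h : l ≠ []) :
    wrapB (r :: l) = r ++ "[" ++ wrapB l ++ "]" := by
  cases l with
  | nil => exact absurd rfl h
  | cons y t => rfl

theorem chainA_eq_wrap_pathB (emb : List (String × String)) (k : Nat) (r : String) :
    chainA emb k r = wrapB (pathB emb k r) := by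
  induction k generalizing r with
  | zero => rfl
  | succ k ih =>
    simp only [chainA, pathB]
    cases h : emb.find? (fun cp => cp.2 == r) with
    | none => rfl
    | some cp => simp only [wrapB_cons _ _ (pathB_ne_nil emb k cp.1), ih]

theorem getD_foldl_insert_empty (l : List String)
    (d : PySem.Dict String (PySem.Set String))
    (hd : ∀ x, d.getD x PySem.Set.empty = PySem.Set.empty) (x : String) :
    (l.foldl (fun d r => d.insert r PySem.Set.empty) d).getD x PySem.Set.empty = PySem.Set.empty := by
  induction l generalizing d with
  | nil => exact hd x
  | cons a t ih =>
    refine ih _ (fun y => ?_)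
    rw [PySem.Dict.getD_insert]
    split
    · rfl
    · exact hd y

theorem mem_getD_foldl_modify_add {P : Type} (l : List P) (k v : P → String)
    (d : PySem.Dict String (PySem.Set String)) (r x : String) :
    (x ∈ (l.foldl (fun d p => d.modify (k p) PySem.Set.empty
        (fun s => PySem.Set.add s (v p))) d).getD r PySem.Set.empty) ↔
      x ∈ d.getD r PySem.Set.empty ∨ ∃ p ∈ l, k p = r ∧ v p = x := by
  induction l generalizing d with
  | nil => simp
  | cons a t ih =>
    simp only [List.foldl_cons, ih, List.mem_cons]
    rw [PySem.Dict.getD_modify]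
    constructor
    · rintro (h | h)
      · split at h
        · rw [PySem.Set.mem_add] at h
          rcases h with h | h
          · exact Or.inl (by simpa [*] using h)
          · exact Or.inr ⟨a, Or.inl rfl, by tauto⟩
        · exact Or.inl h
      · rcases h with ⟨p, hp, hkr, hvx⟩
        exact Or.inr ⟨p, Or.inr hp, hkr, hvx⟩
    · rintro (h | ⟨p, (rfl | hp), hkr, hvx⟩)
      · split
        · exact Or.inl (by rw [PySem.Set.mem_add]; exact Or.inl (by simpa [*] using h))
        · exact Or.inl h
      · left
        rw [if_pos hkr.symm, PySem.Set.mem_add]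
        exact Or.inr hvx.symm
      · exact Or.inr ⟨p, hp, hkr, hvx⟩

theorem nodup_getD_foldl_modify_add {P : Type} (l : List P) (k v : P → String)
    (d : PySem.Dict String (PySem.Set String)) (r : String)
    (hd : ∀ r, ((d.getD r PySem.Set.empty : PySem.Set String)).Nodup) :
    ((l.foldl (fun d p => d.modify (k p) PySem.Set.empty
        (fun s => PySem.Set.add s (v p))) d).getD r PySem.Set.empty).Nodup := by
  induction l generalizing d with
  | nil => exact hd r
  | cons a t ih =>
    refine ih _ (fun y => ?_)
    rw [PySem.Dict.getD_modify]
    split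
    · exact PySem.Set.nodup_add _ _ (hd _)
    · exact hd y

-- on a strictly increasing list, list.index order is string order
theorem index_lt_iff (l : List String) (hp : l.Pairwise (· < ·)) (a b : String)
    (ha : a ∈ l) (hb : b ∈ l) :
    ((PySem.List.index? l a).getD 0 < (PySem.List.index? l b).getD 0) ↔ a < b := by
  induction l with
  | nil => cases ha
  | cons c t ih =>
    rw [List.pairwise_cons] at hp
    obtain ⟨hc, hpt⟩ := hp
    rcases List.mem_cons.mp ha with rfl | hat
    · rcases List.mem_cons.mp hb with rfl | hbt
      · simp
      · have hab : a < b := hc b hbt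
        obtain ⟨k, hk⟩ := Option.isSome_iff_exists.mp ((PySem.List.index?_isSome_iff t b).mpr hbt)
        rw [PySem.List.index?_cons_self, PySem.List.index?_cons_of_ne _ (ne_of_lt hab),
          PySem.List.index?_eq_idxOf?] at *
        simp [hk, hab]
    · rcases List.mem_cons.mp hb with rfl | hbt
      · have hca : b < a := hc a hat
        obtain ⟨k, hk⟩ := Option.isSome_iff_exists.mp ((PySem.List.index?_isSome_iff t a).mpr hat)
        rw [PySem.List.index?_cons_of_ne _ (ne_of_lt hca), PySem.List.index?_cons_self,
          PySem.List.index?_eq_idxOf?] at *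
        simp [hk, asymm hca]
      · obtain ⟨ka, hka⟩ := Option.isSome_iff_exists.mp ((PySem.List.index?_isSome_iff t a).mpr hat)
        obtain ⟨kb, hkb⟩ := Option.isSome_iff_exists.mp ((PySem.List.index?_isSome_iff t b).mpr hbt)
        rw [PySem.List.index?_cons_of_ne _ (ne_of_lt (hc a hat)),
          PySem.List.index?_cons_of_ne _ (ne_of_lt (hc b hbt))]
        rw [PySem.List.index?_eq_idxOf?] at hka hkb
        have := ih hpt hat hbt
        rw [PySem.List.index?_eq_idxOf?, PySem.List.index?_eq_idxOf?] at this
        simp [hka, hkb] at this ⊢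
        exact this

theorem sortPairA_fst_le_snd (p : String × String) : (sortPairA p).1 ≤ (sortPairA p).2 := by
  unfold sortPairA
  split
  · assumption
  · exact le_of_not_ge (by assumption)

theorem sortPairA_def (p : String × String) :
    (if p.1 ≤ p.2 then (p.1, p.2) else (p.2, p.1)) = sortPairA p := rfl

theorem mem_or_sortPairA (x : String) (p : String × String) :
    (x = (sortPairA p).1 ∨ x = (sortPairA p).2) ↔ (x = p.1 ∨ x = p.2) := by
  unfold sortPairA; split <;> tauto

-- the two couples dictionaries hold the same set at every realm
theorem couples_eq (cpl : List (String × String)) (R : List String)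
    (hpw : R.Pairwise (· < ·)) (hmem : ∀ p ∈ cpl, p.1 ∈ R ∧ p.2 ∈ R) (r : String) :
    PySem.List.sorted ((List.foldl (fun d p =>
        if (PySem.List.index? R p.1).getD 0 < (PySem.List.index? R p.2).getD 0 then
          d.modify p.1 PySem.Set.empty (fun s => PySem.Set.add s p.2)
        else d.modify p.2 PySem.Set.empty (fun s => PySem.Set.add s p.1))
        (List.foldl (fun d r => d.insert r PySem.Set.empty) PySem.Dict.empty R)
        (PySem.Set.ofList (List.map sortPairA cpl))).getD r PySem.Set.empty) (fun x => x) false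
    = PySem.List.sorted ((List.foldl (fun d p =>
        d.modify (sortPairA p).1 PySem.Set.empty
          (fun s => PySem.Set.add s (sortPairA p).2))
        (List.foldl (fun d r => d.insert r PySem.Set.empty) PySem.Dict.empty R)
        cpl).getD r PySem.Set.empty) (fun x => x) false := by
  have hbase : ∀ x, ((List.foldl (fun d r => d.insert r PySem.Set.empty) PySem.Dict.empty R).getD x
      PySem.Set.empty) = PySem.Set.empty :=
    getD_foldl_insert_empty R PySem.Dict.empty (fun x => PySem.Dict.getD_empty _ _) 
  have hAbody : (fun (d : PySem.Dict String (PySem.Set String)) (p : String × String) =>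
        if (PySem.List.index? R p.1).getD 0 < (PySem.List.index? R p.2).getD 0 then
          d.modify p.1 PySem.Set.empty (fun s => PySem.Set.add s p.2)
        else d.modify p.2 PySem.Set.empty (fun s => PySem.Set.add s p.1))
      = (fun d p => d.modify
          (if (PySem.List.index? R p.1).getD 0 < (PySem.List.index? R p.2).getD 0 then p.1 else p.2)
          PySem.Set.empty (fun s => PySem.Set.add s
          (if (PySem.List.index? R p.1).getD 0 < (PySem.List.index? R p.2).getD 0 then p.2 else p.1))) := by
    funext d p
    by_cases h : (PySem.List.index? R p.1).getD 0 < (PySem.List.index? R p.2).getD 0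
    · simp only [if_pos h]
    · simp only [if_neg h]
  rw [hAbody]
  rw [PySem.List.sorted_id_eq_sorted_id_iff_perm]
  apply (List.perm_ext_iff_of_nodup ?_ ?_).mpr
  · intro x
    rw [mem_getD_foldl_modify_add, mem_getD_foldl_modify_add, hbase]
    have hcoll : ∀ p ∈ cpl,
        ((if (PySem.List.index? R (sortPairA p).1).getD 0 < (PySem.List.index? R (sortPairA p).2).getD 0
            then (sortPairA p).1 else (sortPairA p).2) = (sortPairA p).1) ∧
        ((if (PySem.List.index? R (sortPairA p).1).getD 0 < (PySem.List.index? R (sortPairA p).2).getD 0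
            then (sortPairA p).2 else (sortPairA p).1) = (sortPairA p).2) := by
      intro p hp
      have h12 := sortPairA_fst_le_snd p
      have hm : (sortPairA p).1 ∈ R ∧ (sortPairA p).2 ∈ R := by
        have := hmem p hp
        unfold sortPairA
        split
        · exact ⟨this.1, this.2⟩
        · exact ⟨this.2, this.1⟩
      rcases lt_or_eq_of_le h12 with hlt | heq
      · have hidx := (index_lt_iff R hpw _ _ hm.1 hm.2).mpr hlt
        rw [if_pos hidx, if_pos hidx]
        exact ⟨rfl, rfl⟩
      · rw [heq]
        constructor <;> split <;> rfl
    simp only [PySem.Set.empty, List.not_mem_nil, false_or]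
    constructor
    · rintro ⟨q, hq, hk, hv⟩
      rw [PySem.Set.mem_ofList, List.mem_map] at hq
      obtain ⟨p, hp, rfl⟩ := hq
      obtain ⟨h1, h2⟩ := hcoll p hp
      rw [h1] at hk
      rw [h2] at hv
      exact ⟨p, hp, hk, hv⟩
    · rintro ⟨p, hp, hk, hv⟩
      refine ⟨sortPairA p, (PySem.Set.mem_ofList _ _).mpr (List.mem_map.mpr ⟨p, hp, rfl⟩), ?_, ?_⟩
      · rw [(hcoll p hp).1]; exact hk
      · rw [(hcoll p hp).2]; exact hv
  · exact nodup_getD_foldl_modify_add _ _ _ _ _ (fun y => by rw [hbase]; exact List.nodup_nil)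
  · exact nodup_getD_foldl_modify_add _ _ _ _ _ (fun y => by rw [hbase]; exact List.nodup_nil)

theorem foldl_skip_if {α β : Type} (c : α → Bool) (f : α → β) (l : List α) (acc : List β) :
    List.foldl (fun acc x => if c x = true then acc else acc ++ [f x]) acc l
      = acc ++ List.map f (List.filter (fun x => !c x) l) := by
  rw [← PySem.List.foldl_append_if]
  congr 1
  funext acc x
  cases h : c x <;> simp

theorem generate_crs_eq (embeddings couplings : List (String × String)) :
    generate_crs embeddings couplings = generate_crs_alt embeddings couplings := by
  unfold generate_crs generate_crs_alt
  simp only [sortPairA_def]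
  have hrealms : (PySem.List.sorted ((PySem.Set.ofList
        (List.flatMap (fun p => [p.1, p.2]) embeddings)).union
        (List.flatMap (fun p => [p.1, p.2]) couplings)) (fun x => x) false)
      = (PySem.List.sorted (PySem.Set.ofList
        (List.map (fun x => x.1) embeddings ++ List.map (fun x => x.2) embeddings ++
          List.flatMap (fun p => [p.1, p.2]) (PySem.Set.ofList (List.map sortPairA couplings))))
        (fun x => x) false) := by
    rw [PySem.List.sorted_id_eq_sorted_id_iff_perm]
    apply (List.perm_ext_iff_of_nodup
      (PySem.Set.nodup_union _ _ (PySem.Set.nodup_ofList _)) (PySem.Set.nodup_ofList _)).mpr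
    intro x
    simp only [PySem.Set.mem_union, PySem.Set.mem_ofList, List.mem_append, List.mem_map,
      List.mem_flatMap, List.mem_cons, List.not_mem_nil, or_false]
    constructor
    · rintro (⟨p, hp, (rfl | rfl)⟩ | ⟨p, hp, hx⟩)
      · exact Or.inl (Or.inl ⟨p, hp, rfl⟩)
      · exact Or.inl (Or.inr ⟨p, hp, rfl⟩)
      · exact Or.inr ⟨sortPairA p, ⟨p, hp, rfl⟩, (mem_or_sortPairA x p).mpr hx⟩
    · rintro ((⟨a, ha, rfl⟩ | ⟨a, ha, rfl⟩) | ⟨q, ⟨p, hp, rfl⟩, hx⟩)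
      · exact Or.inl ⟨a, ha, Or.inl rfl⟩
      · exact Or.inl ⟨a, ha, Or.inr rfl⟩
      · exact Or.inr ⟨p, hp, (mem_or_sortPairA x p).mp hx⟩
  rw [hrealms]
  have hpw := PySem.List.sorted_ofList_pairwise_lt
    (List.map (fun x => x.1) embeddings ++ List.map (fun x => x.2) embeddings ++
      List.flatMap (fun p => [p.1, p.2]) (PySem.Set.ofList (List.map sortPairA couplings)))
  have hcpl : ∀ p ∈ couplings,
      p.1 ∈ (PySem.List.sorted (PySem.Set.ofList
        (List.map (fun x => x.1) embeddings ++ List.map (fun x => x.2) embeddings ++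
          List.flatMap (fun p => [p.1, p.2]) (PySem.Set.ofList (List.map sortPairA couplings))))
        (fun x => x) false) ∧
      p.2 ∈ (PySem.List.sorted (PySem.Set.ofList
        (List.map (fun x => x.1) embeddings ++ List.map (fun x => x.2) embeddings ++
          List.flatMap (fun p => [p.1, p.2]) (PySem.Set.ofList (List.map sortPairA couplings))))
        (fun x => x) false) := by
    intro p hp
    constructor <;>
    · rw [PySem.List.mem_sorted, PySem.Set.mem_ofList]
      refine List.mem_append.mpr (Or.inr (List.mem_flatMap.mpr
        ⟨sortPairA p, (PySem.Set.mem_ofList _ _).mpr (List.mem_map.mpr ⟨p, hp, rfl⟩), ?_⟩))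
      simp only [List.mem_cons, List.not_mem_nil, or_false]
      first
      | exact (mem_or_sortPairA p.1 p).mpr (Or.inl rfl)
      | exact (mem_or_sortPairA p.2 p).mpr (Or.inr rfl)
  have hcup := couples_eq couplings _ hpw hcpl
  simp only [hcup, chainA_eq_wrap_pathB]
  have hc : ∀ r : String,
      (List.foldl (fun d cp => d.insert cp.1 cp.2) (PySem.Dict.empty : PySem.Dict String String)
        embeddings).contains r
      = (PySem.Set.ofList (List.map (fun x => x.1) embeddings)).contains r := by
    intro r
    rw [Bool.eq_iff_iff, PySem.Dict.contains_iff_mem_keys, PySem.Set.contains_iff]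
    rw [PySem.Dict.keys_foldl_insert_key embeddings (fun cp => cp.1) (fun _ cp => cp.2)
      PySem.Dict.empty]
    rw [PySem.Dict.keys_empty, PySem.Set.update_nil_left]
  have hfil : (fun r => !(List.foldl (fun d cp => d.insert cp.1 cp.2)
        (PySem.Dict.empty : PySem.Dict String String) embeddings).contains r)
      = (fun r => !(PySem.Set.ofList (List.map (fun x => x.1) embeddings)).contains r) := by
    funext r
    rw [hc r]
  rw [PySem.List.foldl_append_singleton_eq_map, foldl_skip_if, hfil]

-- ===== VERDICT (by name: the statement is the Claim_ definition above) =====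
theorem generate_crs_spec : Claim_equal_generate_crs := by
  intro emb cpl _ _
  unfold Spec_generate_crs
  exact generate_crs_eq emb cpl
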